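-- pv_equiv track=rewrite | github.com/FitAdam/w3resource_python_exercises | Part 1/Ex149.py | foo
-- ===== SOURCE A (Python) =====
-- def foo(x):
--  newrange = list(range(0,x))
--  sum = 0
--  cube_range = []
--
--  for element in newrange:
--  	cube_range.append(element * element * element)
--
--  for element in cube_range:
--  	sum+=element
--
--  return sum
-- ===== SOURCE B (Python) =====
-- def foo(x):
--     if x <= 0:
--         return 0
--     return (x * (x - 1) // 2) ** 2
-- ===== Notes on version B (the rewrite author's own statement) =====
-- stated objective: faster
-- what changed: Replaced the two O(n) loops (build cube list, then sum) with the closed-form (x(x-1)/2)^2 for the sum of cubes 0..x-1.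
import Mathlib
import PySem

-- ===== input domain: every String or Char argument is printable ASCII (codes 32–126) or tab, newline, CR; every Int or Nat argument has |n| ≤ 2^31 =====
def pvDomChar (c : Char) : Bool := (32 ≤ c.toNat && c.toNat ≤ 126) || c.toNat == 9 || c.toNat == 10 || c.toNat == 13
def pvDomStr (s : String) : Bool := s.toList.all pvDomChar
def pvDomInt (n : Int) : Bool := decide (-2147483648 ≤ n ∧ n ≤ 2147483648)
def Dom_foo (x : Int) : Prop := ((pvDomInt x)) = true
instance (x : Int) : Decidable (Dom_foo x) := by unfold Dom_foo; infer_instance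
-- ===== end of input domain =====

-- B replaces A's two loops by the closed form (x(x-1)/2)^2; objective: faster (O(1) vs O(n)).

-- ===== PORT A =====
def foo (x : Int) : Int :=
  let newrange := PySem.List.pyRange 0 x 1
  let cube_range := newrange.foldl (fun acc e => acc ++ [e * e * e]) []
  cube_range.foldl (fun s e => s + e) 0

-- ===== PORT B =====
def foo_alt (x : Int) : Int :=
  if x ≤ 0 then 0
  else (PySem.Int.floordiv (x * (x - 1)) 2) ^ 2

-- ===== PRECONDITION & SPEC =====
def Spec_foo (x : Int) (out : Int) : Prop := out = foo_alt x
instance (x : Int) (out : Int) : Decidable (Spec_foo x out) := by unfold Spec_foo; infer_instance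

-- ===== CLAIM (what is proved, stated in full; the proofs are below) =====
def Claim_equal_foo : Prop := ∀ (x : Int), Dom_foo x → Spec_foo x (foo x)

-- ===== LEMMAS AND PROOFS =====

theorem sum_cubes_pyRange (n : ℕ) :
    ((PySem.List.pyRange 0 n 1).map (fun e => e * e * e)).foldl (fun s e => s + e) 0
      = ((n : Int) * ((n : Int) - 1) / 2) ^ 2 := by
  induction n with
  | zero => simp [PySem.List.pyRange_zero_nat]
  | succ m ih =>
    have h : ((m : Int) + 1) = ((m + 1 : ℕ) : Int) := by push_cast; ring
    rw [show ((m + 1 : ℕ) : Int) = (m : Int) + 1 by push_cast; ring,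
        PySem.List.pyRange_one_succ_right (by positivity)]
    rw [List.map_append, List.foldl_append, ih]
    simp only [List.map_cons, List.map_nil, List.foldl_cons, List.foldl_nil]
    obtain ⟨a, ha⟩ := Int.even_mul_pred_self (m : Int)
    have hb' : Even (((m : Int) + 1) * (((m : Int) + 1) - 1)) := by
      have := Int.even_mul_succ_self (m : Int)
      have he : ((m : Int) + 1) * (((m : Int) + 1) - 1) = (m : Int) * ((m : Int) + 1) := by
        ring
      rw [he]; exact this
    obtain ⟨b, hb⟩ := hb'
    have hae : (m : Int) * ((m : Int) - 1) / 2 = a := by omega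
    have hbe : ((m : Int) + 1) * (((m : Int) + 1) - 1) / 2 = b := by omega
    rw [hae, hbe]
    nlinarith [ha, hb]

theorem foldl_cubes_append (xs : List Int) :
    xs.foldl (fun acc e => acc ++ [e * e * e]) [] = xs.map (fun e => e * e * e) :=
  by simpa using PySem.List.foldl_append_singleton_eq_map (fun e : Int => e * e * e) xs []

-- ===== VERDICT (by name: the statement is the Claim_ definition above) =====
theorem foo_spec : Claim_equal_foo := by
  intro x _
  unfold Spec_foo foo foo_alt
  simp only [foldl_cubes_append]
  by_cases hx : x ≤ 0
  · rw [PySem.List.pyRange_one_eq_nil hx]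
    simp [hx]
  · rw [not_le] at hx
    have hn : x = ((x.toNat : ℕ) : Int) := by omega
    rw [if_neg (by omega)]
    rw [hn, sum_cubes_pyRange]
    rw [PySem.Int.floordiv_eq_ediv_of_pos (by norm_num)]
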